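-- pv_equiv track=rewrite | github.com/MehmetMHY/algorithm-challenges | Jumping-Jims-Encore-Problem/main.py | createIndexMatrix
-- ===== SOURCE A (Python) =====
-- def createIndexMatrix(row, col): # creates matrix of cell indexes (1-row*col)
--     z = [] ; q = 0 ; point = []
--     for i in range(row*col):
--         q = q + 1
--         point.append(q)
--         if(len(point) % col == 0):
--             z.append(point)
--             point = []
--     return z
-- ===== SOURCE B (Python) =====
-- def createIndexMatrix(row, col):
--     if col <= 0:
--         return []
--     return [[i * col + j + 1 for j in range(col)] for i in range(row)]
-- ===== Notes on version B (the rewrite author's own statement) =====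
-- stated objective: idiomatic
-- what changed: Replaced the flat counter loop with a modulo-triggered flush by a nested comprehension computing each cell directly as i*col+j+1, with a guard returning [] for non-positive col.
-- intended difference: When row<0 and col<0, row*col is positive so A accidentally returns a |row| x |col| matrix of indices (e.g. [[1]] for (-1,-1)); B returns [], the intended empty matrix for negative dimensions. — e.g. on createIndexMatrix(-1, -1): A returns [[1]], B returns []
import Mathlib
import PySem

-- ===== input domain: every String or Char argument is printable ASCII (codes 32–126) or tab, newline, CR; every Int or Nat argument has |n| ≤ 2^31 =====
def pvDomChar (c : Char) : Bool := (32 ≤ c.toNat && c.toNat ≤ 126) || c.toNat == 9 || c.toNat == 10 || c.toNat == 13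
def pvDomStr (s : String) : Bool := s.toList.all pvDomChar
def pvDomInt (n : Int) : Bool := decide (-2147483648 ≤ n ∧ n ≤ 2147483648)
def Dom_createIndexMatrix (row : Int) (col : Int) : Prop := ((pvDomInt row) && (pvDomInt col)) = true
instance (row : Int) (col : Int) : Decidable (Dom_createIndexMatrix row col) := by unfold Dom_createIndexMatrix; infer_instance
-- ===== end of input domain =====

-- B replaces A's flat counter loop with modulo-triggered flush by a nested comprehension
-- computing each cell directly (idiomatic); on row<0 ∧ col<0 B returns [] where A
-- accidentally returns a |row|×|col| matrix (stated as D_ below).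

-- ===== PORT A =====
-- loop body of A: q += 1; point.append(q); if len(point) % col == 0: z.append(point); point = []
def pvStepA (col : Int) (st : List (List Int) × Int × List Int) :
    List (List Int) × Int × List Int :=
  let q := st.2.1 + 1
  let point := st.2.2 ++ [q]
  if PySem.Int.mod (point.length : Int) col == 0 then (st.1 ++ [point], q, [])
  else (st.1, q, point)

def createIndexMatrix (row : Int) (col : Int) : List (List Int) :=
  ((PySem.List.pyRange 0 (row * col) 1).foldl (fun st _ => pvStepA col st) ([], 0, [])).1

-- ===== PORT B =====
def createIndexMatrix_alt (row : Int) (col : Int) : List (List Int) :=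
  if col ≤ 0 then []
  else (PySem.List.pyRange 0 row 1).map (fun i =>
    (PySem.List.pyRange 0 col 1).map (fun j => i * col + j + 1))

-- ===== PRECONDITION & SPEC =====
-- When row<0 and col<0, row*col is positive so A accidentally returns a |row|×|col| matrix
-- of indices (e.g. [[1]] for (-1,-1)); B returns [], the intended empty matrix for
-- negative dimensions.
def D_createIndexMatrix (row : Int) (col : Int) : Prop := row < 0 ∧ col < 0
instance (row : Int) (col : Int) : Decidable (D_createIndexMatrix row col) := by
  unfold D_createIndexMatrix; infer_instance

def Spec_createIndexMatrix (row : Int) (col : Int) (out : List (List Int)) : Prop :=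
  ¬ D_createIndexMatrix row col → out = createIndexMatrix_alt row col
instance (row : Int) (col : Int) (out : List (List Int)) :
    Decidable (Spec_createIndexMatrix row col out) := by
  unfold Spec_createIndexMatrix; infer_instance

def pvDiffWitness_createIndexMatrix : Int × Int := (-1, -1)
def pvDiffWitnessOut_createIndexMatrix : (List (List Int)) × (List (List Int)) := ([[1]], [])

-- ===== CLAIM (what is proved, stated in full; the proofs are below) =====
def Claim_unchanged_createIndexMatrix : Prop := ∀ (row : Int) (col : Int), Dom_createIndexMatrix row col → Spec_createIndexMatrix row col (createIndexMatrix row col)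
def Claim_changed_createIndexMatrix : Prop := Dom_createIndexMatrix (pvDiffWitness_createIndexMatrix.1) (pvDiffWitness_createIndexMatrix.2) ∧ D_createIndexMatrix (pvDiffWitness_createIndexMatrix.1) (pvDiffWitness_createIndexMatrix.2) ∧ createIndexMatrix (pvDiffWitness_createIndexMatrix.1) (pvDiffWitness_createIndexMatrix.2) = pvDiffWitnessOut_createIndexMatrix.1 ∧ createIndexMatrix_alt (pvDiffWitness_createIndexMatrix.1) (pvDiffWitness_createIndexMatrix.2) = pvDiffWitnessOut_createIndexMatrix.2 ∧ pvDiffWitnessOut_createIndexMatrix.1 ≠ pvDiffWitnessOut_createIndexMatrix.2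
def Claim_exact_createIndexMatrix : Prop := ∀ (row : Int) (col : Int), Dom_createIndexMatrix row col → D_createIndexMatrix row col → createIndexMatrix row col ≠ createIndexMatrix_alt row col

-- ===== LEMMAS AND PROOFS =====

-- a foldl whose body ignores the list element is an iterate
theorem pv_foldl_const {α β : Type} (g : β → β) (l : List α) (s : β) :
    l.foldl (fun st _ => g st) s = g^[l.length] s := by
  induction l generalizing s with
  | nil => rfl
  | cons a l ih => simp [List.foldl_cons, ih, Function.iterate_succ_apply]

-- flushing one row: starting with a partial row p needing j more cells
theorem pv_inner (col : Int) (c : Nat) (hc : col = (c : Int) ∨ col = -(c : Int))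
    (j : Nat) (hj : 1 ≤ j) :
    ∀ (p : List Int), p.length + j = c → ∀ (z : List (List Int)) (q : Int),
    (pvStepA col)^[j] (z, q, p) =
      (z ++ [p ++ (List.range j).map (fun (t : Nat) => q + (t : Int) + 1)], q + (j : Int), []) := by
  induction j with
  | zero => omega
  | succ j ih =>
    intro p hp z q
    rw [Function.iterate_succ_apply]
    by_cases hj0 : j = 0
    · subst hj0
      have hdvd : PySem.Int.mod ((p ++ [q + 1]).length : Int) col = 0 := by
        rw [PySem.Int.mod_eq_zero_iff_dvd]
        have hlc : ((p ++ [q + 1]).length : Int) = (c : Int) := by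
          simp; omega
        rw [hlc]
        rcases hc with h | h <;> subst h
        · exact dvd_rfl
        · exact (neg_dvd).mpr dvd_rfl
      simp only [pvStepA, hdvd]
      simp
    · have hnd : ¬ PySem.Int.mod ((p ++ [q + 1]).length : Int) col = 0 := by
        rw [PySem.Int.mod_eq_zero_iff_dvd]
        intro hd
        have hd' : (c : Int) ∣ ((p ++ [q + 1]).length : Int) := by
          rcases hc with h | h <;> subst h
          · exact hd
          · exact (neg_dvd).mp hd
        have hdn : (c : Nat) ∣ (p ++ [q + 1]).length := by exact_mod_cast hd'
        have := Nat.le_of_dvd (by simp) hdn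
        simp at this; omega
      have hstep : pvStepA col (z, q, p) = (z, q + 1, p ++ [q + 1]) := by
        simp only [pvStepA]
        rw [if_neg (by simpa using hnd)]
      rw [hstep, ih (by omega) (p ++ [q + 1]) (by simp; omega) z (q + 1)]
      have hrow : (p ++ [q + 1]) ++ (List.range j).map (fun (t : Nat) => q + 1 + (t : Int) + 1)
          = p ++ (List.range (j + 1)).map (fun (t : Nat) => q + (t : Int) + 1) := by
        rw [List.range_succ_eq_map, List.map_cons, List.map_map, List.append_assoc]
        congr 1
        rw [List.singleton_append]
        congr 1
        · push_cast; ring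
        · apply List.map_congr_left; intro t _
          simp only [Function.comp_apply]
          push_cast; ring
      rw [hrow]
      have hq : q + 1 + (j : Int) = q + ((j + 1 : Nat) : Int) := by push_cast; ring
      rw [hq]

-- k full rows of c cells each
theorem pv_outer (col : Int) (c : Nat) (hc : col = (c : Int) ∨ col = -(c : Int))
    (hc1 : 1 ≤ c) (k : Nat) :
    ∀ (z : List (List Int)) (q : Int),
    (pvStepA col)^[k * c] (z, q, []) =
      (z ++ (List.range k).map (fun (i : Nat) =>
        (List.range c).map (fun (t : Nat) => q + (i : Int) * (c : Int) + (t : Int) + 1)),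
       q + (k : Int) * (c : Int), []) := by
  induction k with
  | zero => simp
  | succ k ih =>
    intro z q
    have hsplit : (k + 1) * c = k * c + c := by ring
    rw [hsplit, Function.iterate_add_apply,
        pv_inner col c hc c hc1 [] (by simp) z q, ih _ _]
    simp only [Prod.mk.injEq]
    refine ⟨?_, ?_, trivial⟩
    · rw [List.append_assoc]
      congr 1
      rw [List.singleton_append, List.range_succ_eq_map, List.map_cons, List.map_map]
      congr 1
      · rw [List.nil_append]
        apply List.map_congr_left; intro t _
        push_cast; ring_nf
      · apply List.map_congr_left; intro i _
        simp only [Function.comp_apply]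
        apply List.map_congr_left; intro t _
        push_cast; ring
    · push_cast; ring

-- A as a closed-form matrix whenever row*col factors as r*c with flushes every c
theorem pv_A_closed (row col : Int) (r c : Nat) (hc : col = (c : Int) ∨ col = -(c : Int))
    (hc1 : 1 ≤ c) (hm : row * col = (r : Int) * (c : Int)) :
    createIndexMatrix row col =
      (List.range r).map (fun (i : Nat) =>
        (List.range c).map (fun (t : Nat) => (i : Int) * (c : Int) + (t : Int) + 1)) := by
  unfold createIndexMatrix
  rw [pv_foldl_const (pvStepA col) _ ([], 0, [])]
  have hlen : (PySem.List.pyRange 0 (row * col) 1).length = r * c := by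
    rw [PySem.List.length_pyRange_one, hm]
    omega
  rw [hlen, pv_outer col c hc hc1 r [] 0]
  simp

theorem pv_A_empty (row col : Int) (h : row * col ≤ 0) : createIndexMatrix row col = [] := by
  unfold createIndexMatrix
  rw [PySem.List.pyRange_one_eq_nil (by omega)]
  rfl

-- ===== VERDICT (by name: the statement is the Claim_ definition above) =====
theorem createIndexMatrix_spec : Claim_unchanged_createIndexMatrix := by
  intro row col _ hD
  unfold D_createIndexMatrix at hD
  by_cases hcol : col ≤ 0
  · -- B = [], and since ¬(row<0 ∧ col<0), row*col ≤ 0 so A = []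
    have hrow : 0 ≤ row ∨ col = 0 := by
      rcases lt_or_ge col 0 with h | h
      · left; by_contra h'; exact hD ⟨by omega, h⟩
      · right; omega
    have hprod : row * col ≤ 0 := by
      rcases hrow with h | h
      · exact mul_nonpos_iff.mpr (Or.inl ⟨h, hcol⟩)
      · simp [h]
    rw [pv_A_empty row col hprod]
    unfold createIndexMatrix_alt
    rw [if_pos hcol]
  · have hcol' : 0 < col := by omega
    by_cases hrow : row ≤ 0
    · have hprod : row * col ≤ 0 := mul_nonpos_iff.mpr (Or.inr ⟨hrow, by omega⟩)
      rw [pv_A_empty row col hprod]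
      unfold createIndexMatrix_alt
      rw [if_neg (by omega),
          show PySem.List.pyRange 0 row 1 = [] from PySem.List.pyRange_one_eq_nil (by omega)]
      rfl
    · have hrow' : 0 < row := by omega
      set r := row.toNat with hr
      set c := col.toNat with hcn
      have hrowe : row = (r : Int) := by omega
      have hcole : col = (c : Int) := by omega
      rw [pv_A_closed row col r c (Or.inl hcole) (by omega)
        (by rw [hrowe, hcole])]
      unfold createIndexMatrix_alt
      rw [if_neg (by omega), hrowe, PySem.List.pyRange_one, hcole,
          PySem.List.pyRange_one]
      simp only [sub_zero, Int.toNat_natCast, List.map_map]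
      apply List.map_congr_left; intro i _
      simp only [Function.comp_apply]
      apply List.map_congr_left; intro t _
      simp only [Function.comp_apply]
      ring

theorem createIndexMatrix_changed : Claim_changed_createIndexMatrix := by
  unfold Claim_changed_createIndexMatrix; decide

theorem createIndexMatrix_tight : Claim_exact_createIndexMatrix := by
  intro row col _ hD
  obtain ⟨hr, hc⟩ := hD
  set r := (-row).toNat with hrn
  set c := (-col).toNat with hcn
  have hr1 : 1 ≤ r := by omega
  have hrowe : row = -(r : Int) := by omega
  have hcole : col = -(c : Int) := by omega
  rw [pv_A_closed row col r c (Or.inr hcole) (by omega)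
    (by rw [hrowe, hcole]; ring)]
  have hB : createIndexMatrix_alt row col = [] := by
    unfold createIndexMatrix_alt; rw [if_pos (by omega)]
  rw [hB]
  intro hcontra
  have hlen := congrArg List.length hcontra
  simp at hlen
  omega
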